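-- pv_equiv track=rewrite | github.com/myle1996kh/sbf-voice-cloning | utils/nlp_processor.py | enhanced_grammar_correction
-- ===== SOURCE A (Python) =====
-- def enhanced_grammar_correction(text):
--     """
--     Enhanced grammar corrections with better context awareness.
--     Used as fallback when LanguageTool is unavailable.
--
--     Args:
--         text (str): Original text
--
--     Returns:
--         str: Text with corrections applied
--     """
--
--     if not text:
--         return text
--
--     # Convert to sentence for processing
--     original_text = text.strip()
--     words = original_text.split()
--     corrected_words = []
--
--     for i, word in enumerate(words):
--         # Handle subject-verb agreement
--         if i > 0:
--             prev_word = words[i-1].lower().rstrip('.,!?')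
--             current_word = word.lower().rstrip('.,!?')
--
--             # Subject-verb agreement fixes
--             if prev_word in ['she', 'he', 'it'] and current_word == "don't":
--                 # Preserve punctuation
--                 punctuation = ''.join(c for c in word if c in '.,!?')
--                 corrected_words.append("doesn't" + punctuation)
--                 continue
--             elif prev_word == 'i' and current_word == "doesn't":
--                 punctuation = ''.join(c for c in word if c in '.,!?')
--                 corrected_words.append("don't" + punctuation)
--                 continue
--             elif prev_word in ['they', 'we', 'you'] and current_word == "doesn't":
--                 punctuation = ''.join(c for c in word if c in '.,!?')
--                 corrected_words.append("don't" + punctuation)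
--                 continue
--
--         # Basic word corrections
--         word_clean = word.lower().rstrip('.,!?')
--         punctuation = ''.join(c for c in word if c in '.,!?')
--
--         corrections = {
--             "im": "I'm",
--             "cant": "can't",
--             "wont": "won't",
--             "shouldnt": "shouldn't",
--             "couldnt": "couldn't",
--             "wouldnt": "wouldn't",
--             "isnt": "isn't",
--             "arent": "aren't",
--             "wasnt": "wasn't",
--             "werent": "weren't",
--             "hasnt": "hasn't",
--             "havent": "haven't",
--             "hadnt": "hadn't",
--             "didnt": "didn't",
--             "doesnt": "doesn't",
--             "thats": "that's",
--             "whats": "what's",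
--             "hes": "he's",
--             "shes": "she's",
--             "its": "it's",  # Only for "it is", not possessive
--             "youre": "you're",
--             "were": "we're",  # Context dependent
--             "theyre": "they're"
--         }
--
--         # Apply basic corrections
--         if word_clean in corrections:
--             corrected_word = corrections[word_clean] + punctuation
--         else:
--             corrected_word = word
--
--         corrected_words.append(corrected_word)
--
--     # Rejoin text
--     corrected_text = ' '.join(corrected_words)
--
--     # Capitalize first letter
--     if corrected_text:
--         corrected_text = corrected_text[0].upper() + corrected_text[1:]
--
--     # Ensure proper ending punctuation
--     if corrected_text and not corrected_text.endswith(('.', '!', '?')):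
--         corrected_text += '.'
--
--     # Clean up extra spaces
--     corrected_text = ' '.join(corrected_text.split())
--
--     return corrected_text
-- ===== SOURCE B (Python) =====
-- _PUNCT = ".,!?"
--
-- _CORRECTIONS = {
--     "im": "I'm", "cant": "can't", "wont": "won't", "shouldnt": "shouldn't",
--     "couldnt": "couldn't", "wouldnt": "wouldn't", "isnt": "isn't",
--     "arent": "aren't", "wasnt": "wasn't", "werent": "weren't",
--     "hasnt": "hasn't", "havent": "haven't", "hadnt": "hadn't",
--     "didnt": "didn't", "doesnt": "doesn't", "thats": "that's",
--     "whats": "what's", "hes": "he's", "shes": "she's", "its": "it's",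
--     "youre": "you're", "were": "we're", "theyre": "they're",
-- }
--
--
-- def _clean(word):
--     return word.lower().rstrip(_PUNCT)
--
--
-- def _punct(word):
--     return "".join(c for c in word if c in _PUNCT)
--
--
-- def _correct(prev, word):
--     # prev = cleaned previous original word, or None at the first word
--     cur = _clean(word)
--     if prev in ("she", "he", "it") and cur == "don't":
--         return "doesn't" + _punct(word)
--     if prev in ("i", "they", "we", "you") and cur == "doesn't":
--         return "don't" + _punct(word)
--     if cur in _CORRECTIONS:
--         return _CORRECTIONS[cur] + _punct(word)
--     return word
--
--
-- def enhanced_grammar_correction(text):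
--     if not text:
--         return text
--     # single character-level scan: tokenize and correct in one streaming pass,
--     # carrying (current word buffer, cleaned previous original word)
--     out = []
--     buf = []
--     prev = None
--     for c in text.strip() + " ":  # sentinel space flushes the last word
--         if c.isspace():
--             if buf:
--                 word = "".join(buf)
--                 out.append(_correct(prev, word))
--                 prev = _clean(word)
--                 buf = []
--         else:
--             buf.append(c)
--     result = " ".join(out)
--     if result:
--         result = result[0].upper() + result[1:]
--     if result and not result.endswith((".", "!", "?")):
--         result += "."
--     return " ".join(result.split())
-- ===== Notes on version B (the rewrite author's own statement) =====
-- stated objective: alternative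
-- what changed: A splits the text into a word list and runs an indexed enumerate loop with words[i-1] lookups, continue-style early appends and the 23-entry corrections dict literal rebuilt each iteration; B never builds an indexed word list: it is a single character-level scanner state machine over the stripped text plus a sentinel space, carrying (output words, current word buffer, cleaned previous word) and emitting each corrected word at the whitespace that ends it.
import Mathlib
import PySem

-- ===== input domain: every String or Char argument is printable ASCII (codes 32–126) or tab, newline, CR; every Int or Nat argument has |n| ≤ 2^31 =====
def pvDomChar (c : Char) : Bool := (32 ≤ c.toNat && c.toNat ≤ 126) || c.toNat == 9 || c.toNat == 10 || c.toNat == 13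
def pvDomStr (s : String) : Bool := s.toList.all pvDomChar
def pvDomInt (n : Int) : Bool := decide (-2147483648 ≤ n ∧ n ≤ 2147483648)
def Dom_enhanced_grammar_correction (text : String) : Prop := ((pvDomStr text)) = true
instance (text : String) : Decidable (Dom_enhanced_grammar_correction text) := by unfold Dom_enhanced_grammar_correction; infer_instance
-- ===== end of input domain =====

-- B replaces A's enumerate-over-split-words loop (index arithmetic, words[i-1] lookups,
-- per-word dict literal) by ONE character-level scanner that tokenizes and corrects in a
-- single streaming pass carrying (word buffer, cleaned previous word); objective: alternative.

-- shared primitive expressions (B's helpers; A writes the same expressions inline)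
def pvPunct : List Char := ['.', ',', '!', '?']

-- exact port of str.rstrip('.,!?'): drop trailing characters belonging to the set
def pvRstripPunct (w : List Char) : List Char := (w.reverse.dropWhile (· ∈ pvPunct)).reverse

def pvCleanW (w : List Char) : List Char := pvRstripPunct (PySem.Chars.lower w)

-- ''.join(c for c in word if c in '.,!?')
def pvPunctOf (w : List Char) : List Char := w.filter (· ∈ pvPunct)

-- the `corrections` dict literal (no duplicate keys; lookup = first match)
def pvCorrections : List (List Char × List Char) :=
  [("im".toList, "I'm".toList), ("cant".toList, "can't".toList), ("wont".toList, "won't".toList),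
   ("shouldnt".toList, "shouldn't".toList), ("couldnt".toList, "couldn't".toList),
   ("wouldnt".toList, "wouldn't".toList), ("isnt".toList, "isn't".toList),
   ("arent".toList, "aren't".toList), ("wasnt".toList, "wasn't".toList),
   ("werent".toList, "weren't".toList), ("hasnt".toList, "hasn't".toList),
   ("havent".toList, "haven't".toList), ("hadnt".toList, "hadn't".toList),
   ("didnt".toList, "didn't".toList), ("doesnt".toList, "doesn't".toList),
   ("thats".toList, "that's".toList), ("whats".toList, "what's".toList),
   ("hes".toList, "he's".toList), ("shes".toList, "she's".toList),
   ("its".toList, "it's".toList), ("youre".toList, "you're".toList),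
   ("were".toList, "we're".toList), ("theyre".toList, "they're".toList)]

-- the identical tail of both Python functions: join, capitalize first letter,
-- ensure ending punctuation, collapse spaces
def pvFinish (ws : List (List Char)) : String :=
  let ct := PySem.Chars.join [' '] ws
  let ct2 := match ct with
    | [] => ct
    | c :: rest => PySem.Chars.upperChar c :: rest
  let ct3 := if ct2 ≠ [] ∧ ¬(PySem.Chars.endswith ct2 ['.'] = true ∨
      PySem.Chars.endswith ct2 ['!'] = true ∨ PySem.Chars.endswith ct2 ['?'] = true)
    then ct2 ++ ['.'] else ct2
  String.ofList (PySem.Chars.join [' '] (PySem.Chars.split₀ ct3))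

-- ===== PORT A =====
-- the body of A's `for i, word in enumerate(words)` loop (appends one word; `continue` = early append)
def pvAStep (words : List (List Char)) (acc : List (List Char)) (iw : Int × List Char) :
    List (List Char) :=
  let i := iw.1
  let word := iw.2
  let basic : List (List Char) :=          -- the "Basic word corrections" part of the body
    let word_clean := pvCleanW word
    let punctuation := pvPunctOf word
    match pvCorrections.lookup word_clean with
    | some v => acc ++ [v ++ punctuation]
    | none => acc ++ [word]
  if i > 0 then
    let prev_word := pvCleanW (PySem.List.pyGetD words (i - 1) [])
    let current_word := pvCleanW word
    if prev_word ∈ ["she".toList, "he".toList, "it".toList] ∧ current_word = "don't".toList then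
      acc ++ ["doesn't".toList ++ pvPunctOf word]
    else if prev_word = "i".toList ∧ current_word = "doesn't".toList then
      acc ++ ["don't".toList ++ pvPunctOf word]
    else if prev_word ∈ ["they".toList, "we".toList, "you".toList] ∧ current_word = "doesn't".toList then
      acc ++ ["don't".toList ++ pvPunctOf word]
    else basic
  else basic

def enhanced_grammar_correction (text : String) : String :=
  if text.toList = [] then text
  else
    let words := PySem.Chars.split₀ (PySem.Chars.strip text.toList)
    let corrected_words := (PySem.List.enumerate words 0).foldl (pvAStep words) []
    pvFinish corrected_words

-- ===== PORT B =====
-- Source B's _correct(prev, word): agreement (keyed on the cleaned previous original word,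
-- None at the first word) or dictionary, one decision
def pvBCorrect (prev : Option (List Char)) (word : List Char) : List Char :=
  let cur := pvCleanW word
  if prev ∈ [some "she".toList, some "he".toList, some "it".toList] ∧ cur = "don't".toList then
    "doesn't".toList ++ pvPunctOf word
  else if prev ∈ [some "i".toList, some "they".toList, some "we".toList, some "you".toList]
      ∧ cur = "doesn't".toList then
    "don't".toList ++ pvPunctOf word
  else match pvCorrections.lookup cur with
    | some v => v ++ pvPunctOf word
    | none => word

-- Source B's scanner-loop body: state = (out, buf, prev); flush on whitespace
def pvBStep (st : List (List Char) × List Char × Option (List Char)) (c : Char) :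
    List (List Char) × List Char × Option (List Char) :=
  if PySem.Chars.isspace c then
    if st.2.1 = [] then st
    else (st.1 ++ [pvBCorrect st.2.2 st.2.1], [], some (pvCleanW st.2.1))
  else (st.1, st.2.1 ++ [c], st.2.2)

def enhanced_grammar_correction_alt (text : String) : String :=
  if text.toList = [] then text
  else
    let st := (PySem.Chars.strip text.toList ++ [' ']).foldl pvBStep
      (([] : List (List Char)), ([] : List Char), (none : Option (List Char)))
    pvFinish st.1

-- ===== PRECONDITION & SPEC =====
def Spec_enhanced_grammar_correction (text : String) (out : String) : Prop := out = enhanced_grammar_correction_alt text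
instance (text : String) (out : String) : Decidable (Spec_enhanced_grammar_correction text out) := by unfold Spec_enhanced_grammar_correction; infer_instance

-- ===== CLAIM =====
def Claim_equal_enhanced_grammar_correction : Prop := ∀ (text : String), Dom_enhanced_grammar_correction text → Spec_enhanced_grammar_correction text (enhanced_grammar_correction text)

-- ===== LEMMAS AND PROOFS =====

-- specification of the per-word result, threading the cleaned previous word
def pvSpecFix : Option (List Char) → List (List Char) → List (List Char)
  | _, [] => []
  | p, w :: ws => pvBCorrect p w :: pvSpecFix (some (pvCleanW w)) ws

lemma pvAStep_eq (pre suf : List (List Char)) (w : List Char) (acc : List (List Char)) :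
    pvAStep (pre ++ w :: suf) acc ((pre.length : Int), w)
      = acc ++ [pvBCorrect (pre.getLast?.map pvCleanW) w] := by
  rcases List.eq_nil_or_concat pre with rfl | ⟨q, p, rfl⟩
  · simp only [pvAStep, List.length_nil, Nat.cast_zero, lt_self_iff_false,
      pvBCorrect, List.getLast?_nil, Option.map_none]
    cases pvCorrections.lookup (pvCleanW w) <;> simp
  · simp only [List.concat_eq_append]
    have hi : ((q ++ [p]).length : Int) > 0 := by simp
    have hget : PySem.List.pyGetD ((q ++ [p]) ++ w :: suf) (((q ++ [p]).length : Int) - 1) [] = p := by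
      have h1 : (((q ++ [p]).length : Int) - 1) = (q.length : Int) := by simp
      rw [h1, PySem.List.pyGetD_natCast]
      simp [List.getD, List.append_assoc]
    simp only [pvAStep, if_pos hi, hget, pvBCorrect, List.getLast?_concat, Option.map_some]
    split_ifs <;> try simp_all
    all_goals cases List.lookup (pvCleanW w) pvCorrections <;> simp

lemma pvA_loop (suf : List (List Char)) : ∀ (pre acc : List (List Char)),
    (PySem.List.enumerate suf (pre.length : Int)).foldl (pvAStep (pre ++ suf)) acc
      = acc ++ pvSpecFix (pre.getLast?.map pvCleanW) suf := by
  induction suf with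
  | nil => intro pre acc; simp [PySem.List.enumerate, pvSpecFix]
  | cons w ws ih =>
    intro pre acc
    have he : PySem.List.enumerate (w :: ws) (pre.length : Int)
        = ((pre.length : Int), w) :: PySem.List.enumerate ws ((pre.length : Int) + 1) := rfl
    rw [he, List.foldl_cons, pvAStep_eq pre ws w acc]
    have hlen : ((pre.length : Int) + 1) = ((pre ++ [w]).length : Int) := by simp
    have happ : pre ++ w :: ws = (pre ++ [w]) ++ ws := by simp
    rw [hlen, happ, ih (pre ++ [w])]
    simp [pvSpecFix]

-- split₀.go's accumulator is reversed output prefixed to the rest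
lemma pvGo_acc (cs : List Char) : ∀ (cur : List Char) (acc : List (List Char)),
    PySem.Chars.split₀.go cs cur acc = acc.reverse ++ PySem.Chars.split₀.go cs cur [] := by
  induction cs with
  | nil =>
    intro cur acc
    simp only [PySem.Chars.split₀.go]
    split_ifs <;> simp
  | cons c cs ih =>
    intro cur acc
    simp only [PySem.Chars.split₀.go]
    split_ifs with h1 h2
    · exact ih [] acc
    · rw [ih [] (cur.reverse :: acc), ih [] [cur.reverse]]; simp
    · exact ih (c :: cur) acc

-- B's char scan over cs ++ [' '] = per-word correction of split₀'s words
lemma pvB_scan (cs : List Char) : ∀ (buf : List Char) (prev : Option (List Char))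
    (out : List (List Char)),
    ((cs ++ [' ']).foldl pvBStep (out, buf, prev)).1
      = out ++ pvSpecFix prev (PySem.Chars.split₀.go cs buf.reverse []) := by
  induction cs with
  | nil =>
    intro buf prev out
    simp only [List.nil_append, List.foldl_cons, List.foldl_nil, PySem.Chars.split₀.go]
    have hsp : PySem.Chars.isspace ' ' = true := by decide
    by_cases hb : buf = []
    · simp [pvBStep, hsp, hb, pvSpecFix]
    · simp [pvBStep, hsp, hb, pvSpecFix, List.isEmpty_iff]
  | cons c cs ih =>
    intro buf prev out
    rw [List.cons_append, List.foldl_cons]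
    simp only [PySem.Chars.split₀.go]
    by_cases hsp : PySem.Chars.isspace c = true
    · by_cases hb : buf = []
      · simp only [pvBStep, hsp, hb, List.reverse_nil, List.isEmpty_nil, if_pos]
        subst hb; exact ih [] prev out
      · have hne : buf.reverse.isEmpty = false := by
          simp [hb]
        simp only [pvBStep, hsp, if_true, if_neg hb, hne, Bool.false_eq_true, if_false,
          List.reverse_reverse]
        rw [ih [] (some (pvCleanW buf)) (out ++ [pvBCorrect prev buf]),
            pvGo_acc cs [] [buf]]
        simp [pvSpecFix]
    · simp only [pvBStep, hsp, Bool.false_eq_true, if_false]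
      rw [ih (buf ++ [c]) prev out]
      simp

-- ===== VERDICT (by name: the statement is the Claim_ definition above) =====
theorem enhanced_grammar_correction_spec : Claim_equal_enhanced_grammar_correction := by
  intro text _
  unfold Spec_enhanced_grammar_correction enhanced_grammar_correction enhanced_grammar_correction_alt
  by_cases h : text.toList = []
  · simp [h]
  · simp only [if_neg h]
    refine congrArg pvFinish ?_
    have hA := pvA_loop (PySem.Chars.split₀ (PySem.Chars.strip text.toList)) [] []
    have hB := pvB_scan (PySem.Chars.strip text.toList) [] none []
    simp only [List.length_nil, Nat.cast_zero, List.nil_append, List.getLast?_nil,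
      Option.map_none] at hA hB
    rw [hA, hB]
    rfl
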